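-- pv_equiv track=rewrite | github.com/TRON-Bioinformatics/covigator | covigator/references/gene_annotations.py | _remove_duplicated_genes
-- ===== SOURCE A (Python) =====
-- def _remove_duplicated_genes(data):
--     results = {}
--     for g in data["genes"]:
--         if g["name"] not in results:
--             results[g["name"]] = g
--         else:
--             if int(g["end"]) - int(g["start"]) > int(results[g["name"]]["end"]) - int(results[g["name"]]["start"]):
--                 # in case of duplications it keeps only the longer gene
--                 results[g["name"]] = g
--     data["genes"] = list(results.values())
--     return data
-- ===== SOURCE B (Python) =====
-- def _remove_duplicated_genes(data):
--     groups = {}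
--     for g in data["genes"]:
--         groups[g["name"]] = groups.get(g["name"], []) + [g]
--     data["genes"] = [grp[0] if len(grp) == 1
--                      else max(grp, key=lambda g: int(g["end"]) - int(g["start"]))
--                      for grp in groups.values()]
--     return data
-- ===== Notes on version B (the rewrite author's own statement) =====
-- stated objective: alternative
-- what changed: Instead of A's single pass that keeps a running longest-so-far gene per name with an explicit compare-and-replace branch, B first groups all genes by name into a dict of lists and then selects each group's longest gene with max(key=length), taking grp[0] directly for singleton groups so ints are only parsed on a real name collision, exactly as in A; first-appearance dict order and max's first-maximal tie rule reproduce A's output exactly.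
-- outside the precondition, e.g. on _remove_duplicated_genes({}): A raises KeyError, B raises KeyError
import Mathlib
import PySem

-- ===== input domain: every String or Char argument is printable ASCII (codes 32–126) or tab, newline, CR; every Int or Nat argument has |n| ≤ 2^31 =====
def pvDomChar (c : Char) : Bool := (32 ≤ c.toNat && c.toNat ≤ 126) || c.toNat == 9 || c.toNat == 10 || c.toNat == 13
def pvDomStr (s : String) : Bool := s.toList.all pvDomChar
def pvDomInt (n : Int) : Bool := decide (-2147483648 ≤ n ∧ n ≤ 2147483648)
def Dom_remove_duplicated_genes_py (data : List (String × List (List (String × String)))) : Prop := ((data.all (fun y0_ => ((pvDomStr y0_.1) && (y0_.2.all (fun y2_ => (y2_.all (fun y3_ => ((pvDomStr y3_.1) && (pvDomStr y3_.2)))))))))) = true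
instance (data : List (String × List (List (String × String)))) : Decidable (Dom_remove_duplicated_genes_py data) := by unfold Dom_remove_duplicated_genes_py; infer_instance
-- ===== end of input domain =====

-- B replaces A's single pass that keeps a running longest-so-far gene per name by a group-by-name
-- pass followed by a per-group max(key=length) selection; same return value, and both mutate
-- data["genes"] in place the same way.

-- shared helpers: g["name"] and int(g["end"]) - int(g["start"]) (totalised with defaults; Pre_ excludes the raising inputs)
def pvName (g : List (String × String)) : String :=
  PySem.Dict.getD (PySem.Dict.ofList g) "name" ""

def pvGeneLen (g : List (String × String)) : Int :=
  ((PySem.Int.ofStr? (PySem.Dict.getD (PySem.Dict.ofList g) "end" "")).getD 0)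
    - ((PySem.Int.ofStr? (PySem.Dict.getD (PySem.Dict.ofList g) "start" "")).getD 0)

-- ===== PORT A =====
-- A's loop body: if g["name"] not in results: results[name] = g; else keep the strictly longer one
def pvStepA (results : PySem.Dict String (List (String × String))) (g : List (String × String)) :
    PySem.Dict String (List (String × String)) :=
  match PySem.Dict.get? results (pvName g) with
  | none => PySem.Dict.insert results (pvName g) g
  | some r => if pvGeneLen r < pvGeneLen g then PySem.Dict.insert results (pvName g) g else results

def remove_duplicated_genes_py (data : List (String × List (List (String × String)))) : List (String × List (List (String × String))) :=
  let d := PySem.Dict.ofList data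
  let genes := PySem.Dict.getD d "genes" []
  let results := genes.foldl pvStepA PySem.Dict.empty
  (PySem.Dict.insert d "genes" (PySem.Dict.values results)).items

-- ===== PORT B =====
def remove_duplicated_genes_py_alt (data : List (String × List (List (String × String)))) : List (String × List (List (String × String))) :=
  let d := PySem.Dict.ofList data
  let genes := PySem.Dict.getD d "genes" []
  let groups := genes.foldl (fun groups g => PySem.Dict.modify groups (pvName g) [] (· ++ [g])) PySem.Dict.empty
  (PySem.Dict.insert d "genes"
    (groups.items.map (fun p =>
      if p.2.length = 1 then (PySem.List.pyGet? p.2 0).getD []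
      else (PySem.List.max? p.2 pvGeneLen).getD []))).items

-- ===== PRECONDITION & SPEC =====
-- Pre_ excludes exactly the inputs on which Python A raises: a missing "genes" key (KeyError),
-- a gene without a "name" key (KeyError), or a gene with a DUPLICATED name whose "end"/"start"
-- entry is missing or not int()-parseable (KeyError/ValueError; A only parses ints on a name
-- collision).  B raises on the very same inputs.
def Pre_remove_duplicated_genes_py (data : List (String × List (List (String × String)))) : Prop :=
  (PySem.Dict.get? (PySem.Dict.ofList data) "genes").isSome = true ∧
  ∀ g ∈ PySem.Dict.getD (PySem.Dict.ofList data) "genes" [],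
    (PySem.Dict.get? (PySem.Dict.ofList g) "name").isSome = true ∧
    (2 ≤ ((PySem.Dict.getD (PySem.Dict.ofList data) "genes" []).map pvName).count (pvName g) →
      (PySem.Int.ofStr? (PySem.Dict.getD (PySem.Dict.ofList g) "end" "")).isSome = true ∧
      (PySem.Int.ofStr? (PySem.Dict.getD (PySem.Dict.ofList g) "start" "")).isSome = true)
instance (data : List (String × List (List (String × String)))) : Decidable (Pre_remove_duplicated_genes_py data) := by
  unfold Pre_remove_duplicated_genes_py; infer_instance

def pvWitness_remove_duplicated_genes_py : (List (String × List (List (String × String)))) :=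
  [("genes", [[("name", "orf1"), ("start", "1"), ("end", "10")],
              [("name", "orf1"), ("start", "2"), ("end", "20")]])]

def Spec_remove_duplicated_genes_py (data : List (String × List (List (String × String)))) (out : List (String × List (List (String × String)))) : Prop := out = remove_duplicated_genes_py_alt data
instance (data : List (String × List (List (String × String)))) (out : List (String × List (List (String × String)))) : Decidable (Spec_remove_duplicated_genes_py data out) := by unfold Spec_remove_duplicated_genes_py; infer_instance

-- ===== CLAIM (what is proved, stated in full; the proofs are below) =====
def Claim_equal_remove_duplicated_genes_py : Prop := ∀ (data : List (String × List (List (String × String)))), Dom_remove_duplicated_genes_py data → Pre_remove_duplicated_genes_py data → Spec_remove_duplicated_genes_py data (remove_duplicated_genes_py data)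

-- ===== LEMMAS AND PROOFS =====

-- one step of A's loop adds the gene's name to the key set (in place if already present)
theorem pv_keys_stepA (d : PySem.Dict String (List (String × String))) (g : List (String × String)) :
    (pvStepA d g).keys = PySem.Set.add d.keys (pvName g) := by
  unfold pvStepA
  cases h : PySem.Dict.get? d (pvName g) with
  | none =>
    have hc : d.contains (pvName g) = false := by
      rw [PySem.Dict.contains_eq_isSome_get?, h]; rfl
    have hm : pvName g ∉ d.keys := by
      rw [← PySem.Dict.get?_eq_none_iff_not_mem_keys] at *; exact h
    rw [PySem.Dict.keys_insert_of_not_contains _ _ hc, PySem.Set.add_of_not_mem hm]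
  | some r =>
    have hc : d.contains (pvName g) = true := by
      rw [PySem.Dict.contains_eq_isSome_get?, h]; rfl
    have hm : pvName g ∈ d.keys := (PySem.Dict.contains_iff_mem_keys _ _).mp hc
    rw [PySem.Set.add_of_mem hm]
    by_cases hl : pvGeneLen r < pvGeneLen g
    · simp only [hl, if_true]; exact PySem.Dict.keys_insert_of_contains _ _ hc
    · simp [hl]

-- keys of A's fold: the names in first-appearance order
theorem pv_keys_foldA (genes : List (List (String × String))) (d : PySem.Dict String (List (String × String))) :
    (genes.foldl pvStepA d).keys = PySem.Set.update d.keys (genes.map pvName) := by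
  induction genes generalizing d with
  | nil => simp [PySem.Set.update_nil]
  | cons g gs ih =>
    simp only [List.foldl_cons, List.map_cons, PySem.Set.update_cons, ih, pv_keys_stepA]

-- the entry at the incoming gene's own name evolves by the strict-max step
theorem pv_get?_stepA_eq (d : PySem.Dict String (List (String × String))) (g : List (String × String)) :
    (pvStepA d g).get? (pvName g)
      = (match d.get? (pvName g) with
          | none => some g
          | some m => if pvGeneLen m < pvGeneLen g then some g else some m) := by
  unfold pvStepA
  cases h : PySem.Dict.get? d (pvName g) with
  | none => simp [PySem.Dict.get?_insert_self]
  | some r =>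
    by_cases hl : pvGeneLen r < pvGeneLen g
    · simp [hl, PySem.Dict.get?_insert_self]
    · simp [hl, h]

-- entries at other names are untouched
theorem pv_get?_stepA_ne (d : PySem.Dict String (List (String × String))) (g : List (String × String))
    (n : String) (hne : n ≠ pvName g) :
    (pvStepA d g).get? n = d.get? n := by
  unfold pvStepA
  cases h : PySem.Dict.get? d (pvName g) with
  | none => exact PySem.Dict.get?_insert_of_ne _ _ hne
  | some r =>
    by_cases hl : pvGeneLen r < pvGeneLen g
    · simp only [hl, if_true]; exact PySem.Dict.get?_insert_of_ne _ _ hne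
    · simp [hl]

-- the entry at a fixed name n after A's fold is the running strict max over the genes named n
theorem pv_get?_foldA (genes : List (List (String × String))) (d : PySem.Dict String (List (String × String))) (n : String) :
    (genes.foldl pvStepA d).get? n
      = (genes.filter (fun g => pvName g == n)).foldl
          (fun acc g => match acc with
            | none => some g
            | some m => if pvGeneLen m < pvGeneLen g then some g else some m)
          (d.get? n) := by
  induction genes generalizing d with
  | nil => rfl
  | cons g gs ih =>
    simp only [List.foldl_cons, List.filter_cons]
    by_cases hb : pvName g = n
    · subst hb
      simp only [beq_self_eq_true, if_true, List.foldl_cons, ih, pv_get?_stepA_eq]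
    · have : (pvName g == n) = false := beq_eq_false_iff_ne.mpr hb
      simp only [this, Bool.false_eq_true, if_false, ih,
        pv_get?_stepA_ne d g n (Ne.symm hb)]

-- the group at a fixed name n after B's fold is the sublist of the genes named n
theorem pv_getD_foldB (genes : List (List (String × String))) (n : String) :
    ((genes.foldl (fun d g => PySem.Dict.modify d (pvName g) [] (· ++ [g])) PySem.Dict.empty).getD n [])
      = genes.filter (fun g => pvName g == n) := by
  have h := PySem.Dict.getD_foldl_modify_append (genes.map (fun g => (pvName g, g)))
      PySem.Dict.empty n
  rw [List.foldl_map] at h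
  simpa [List.filter_map, Function.comp_def] using h

-- Python max(key=…) IS the strict-max running fold (first maximal element wins)
theorem pv_max?_eq (l : List (List (String × String))) :
    PySem.List.max? l pvGeneLen
      = l.foldl (fun acc g => match acc with
          | none => some g
          | some m => if pvGeneLen m < pvGeneLen g then some g else some m) none := by
  unfold PySem.List.max?
  exact PySem.List.foldl_congr_mem _ _ _ _ (fun acc x _ => by cases acc <;> rfl)

-- the central fact: A's kept genes are exactly B's per-group maxima, in the same order
theorem pv_values_eq (genes : List (List (String × String))) :
    PySem.Dict.values (genes.foldl pvStepA PySem.Dict.empty)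
      = ((genes.foldl (fun d g => PySem.Dict.modify d (pvName g) [] (· ++ [g])) PySem.Dict.empty).items.map
          (fun p => if p.2.length = 1 then (PySem.List.pyGet? p.2 0).getD []
                    else (PySem.List.max? p.2 pvGeneLen).getD [])) := by
  have hkA : (genes.foldl pvStepA PySem.Dict.empty).keys = PySem.Set.ofList (genes.map pvName) := by
    rw [pv_keys_foldA]; rfl
  have hkB : (genes.foldl (fun d g => PySem.Dict.modify d (pvName g) [] (· ++ [g])) PySem.Dict.empty).keys
      = PySem.Set.ofList (genes.map pvName) := by
    rw [PySem.Dict.keys_foldl_modify_key genes pvName [] (fun d g => fun v => v ++ [g])]; rfl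
  have hndA : (genes.foldl pvStepA PySem.Dict.empty).keys.Nodup := by
    rw [hkA]; exact PySem.Set.nodup_ofList _
  have hndB : (genes.foldl (fun d g => PySem.Dict.modify d (pvName g) [] (· ++ [g])) PySem.Dict.empty).keys.Nodup := by
    rw [hkB]; exact PySem.Set.nodup_ofList _
  rw [PySem.Dict.values_eq_map_keys _ hndA ([] : List (String × String)),
      PySem.Dict.items_eq_map_keys _ hndB ([] : List (List (String × String))),
      hkA, hkB, List.map_map]
  apply List.map_congr_left
  intro n _
  simp only [Function.comp]
  rw [PySem.Dict.getD_eq_get?_getD, pv_get?_foldA, pv_getD_foldB, PySem.Dict.get?_empty]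
  by_cases hlen : (genes.filter (fun g => pvName g == n)).length = 1
  · obtain ⟨x, hx⟩ := List.length_eq_one_iff.mp hlen
    rw [hx]
    simp [PySem.List.pyGet?, PySem.List.pyIdx?]
  · rw [if_neg hlen, pv_max?_eq]

-- ===== VERDICT (by name: the statement is the Claim_ definition above) =====
theorem remove_duplicated_genes_py_spec : Claim_equal_remove_duplicated_genes_py := by
  intro data _ _
  unfold Spec_remove_duplicated_genes_py remove_duplicated_genes_py remove_duplicated_genes_py_alt
  simp only [pv_values_eq]
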